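-- pv_equiv track=rewrite | github.com/shashanksaurabh10/Low-Level-Design | Interview Experiences/Microsoft/Microsoft-5-Nov-2025.py | reverse_words_keep_punctuations
-- ===== SOURCE A (Python) =====
-- def reverse_words_keep_punctuations(sentence: str) -> str:
--     # Step 1: Extract words manually
--     words = []
--     current = []
--
--     for ch in sentence:
--         if ch.isalnum():
--             current.append(ch)
--         else:
--             if current:
--                 words.append(''.join(current))
--                 current = []
--     if current:
--         words.append(''.join(current))
--
--     # Step 2: Reverse words
--     reversed_words = words[::-1]
--
--     # Step 3: Rebuild the sentence
--     result = []
--     word_index = 0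
--     i = 0
--     while i < len(sentence):
--         if sentence[i].isalnum():
--             # Start of a word
--             # Find word length
--             j = i
--             while j < len(sentence) and sentence[j].isalnum():
--                 j += 1
--             # Replace this word with reversed one
--             result.append(reversed_words[word_index])
--             word_index += 1
--             i = j
--         else:
--             result.append(sentence[i])
--             i += 1
--
--     return ''.join(result)
-- ===== SOURCE B (Python) =====
-- def reverse_words_keep_punctuations(sentence: str) -> str:
--     # Outside-in: repeatedly swap the outermost pair of words and shrink to the
--     # middle; no word list is ever extracted or reversed.
--     out_left, out_right = [], []
--     s = sentence
--     while True:
--         i1 = 0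
--         while i1 < len(s) and not s[i1].isalnum():
--             i1 += 1
--         if i1 == len(s):          # no word left
--             break
--         j1 = i1 + 1
--         while j1 < len(s) and s[j1].isalnum():
--             j1 += 1
--         k2 = len(s)
--         while not s[k2 - 1].isalnum():   # safe: a word exists
--             k2 -= 1
--         i2 = k2 - 1
--         while i2 > 0 and s[i2 - 1].isalnum():
--             i2 -= 1
--         if i2 <= i1:              # single word left
--             break
--         out_left.append(s[:i1])
--         out_left.append(s[i2:k2])
--         out_right.append(s[k2:])
--         out_right.append(s[i1:j1])
--         s = s[j1:i2]
--     out_right.reverse()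
--     return ''.join(out_left) + s + ''.join(out_right)
-- ===== Notes on version B (the rewrite author's own statement) =====
-- stated objective: alternative
-- what changed: B never extracts or reverses a word list: it swaps the outermost pair of words outside-in with two pointers, accumulating the left and right output fragments, and shrinks to the middle substring until at most one word remains.
import Mathlib
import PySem

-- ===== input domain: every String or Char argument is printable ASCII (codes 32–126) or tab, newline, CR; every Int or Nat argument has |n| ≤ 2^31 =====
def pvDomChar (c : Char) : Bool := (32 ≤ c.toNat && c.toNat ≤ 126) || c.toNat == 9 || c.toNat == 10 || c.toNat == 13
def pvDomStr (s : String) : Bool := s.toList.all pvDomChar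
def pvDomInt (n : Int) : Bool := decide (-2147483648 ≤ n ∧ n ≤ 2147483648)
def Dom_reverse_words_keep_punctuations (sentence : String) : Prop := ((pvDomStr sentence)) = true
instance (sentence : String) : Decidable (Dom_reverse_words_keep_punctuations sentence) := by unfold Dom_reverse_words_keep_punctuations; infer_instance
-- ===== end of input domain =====

-- B swaps the outermost pair of words outside-in (two pointers, shrinking to the middle
-- substring) instead of A's extract-word-list / reverse / refill; same output, same cost.

-- ===== PORT A =====

-- Step 1 loop body: accumulate alnum chars, flush a word on a separator.
def pvStepA (st : List (List Char) × List Char) (c : Char) : List (List Char) × List Char :=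
  if PySem.Chars.isalnum c then (st.1, st.2 ++ [c])
  else if st.2 = [] then (st.1, []) else (st.1 ++ [st.2], [])

-- Step 1 result including the trailing 'if current: words.append(...)'.
def pvWordsA (cs : List Char) : List (List Char) :=
  let st := cs.foldl pvStepA ([], [])
  if st.2 = [] then st.1 else st.1 ++ [st.2]

-- inner 'while j < len(sentence) and sentence[j].isalnum(): j += 1' (skip the alnum run)
def pvSkipAlnum : List Char → List Char
  | [] => []
  | c :: cs => if PySem.Chars.isalnum c then pvSkipAlnum cs else c :: cs

theorem pvSkipAlnum_length_le (cs : List Char) : (pvSkipAlnum cs).length ≤ cs.length := by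
  induction cs with
  | nil => simp [pvSkipAlnum]
  | cons c cs ih =>
    simp only [pvSkipAlnum]
    split
    · exact Nat.le_succ_of_le ih
    · simp

-- Step 3 while-loop; rw is reversed_words from word_index on (indexing ported as popping the
-- head; the rw = [] branch is unreachable since word counts match, where Python would raise).
def pvRebuildA : List Char → List (List Char) → List (List Char)
  | [], _ => []
  | c :: cs, rw =>
    if PySem.Chars.isalnum c then
      match rw with
      | w :: ws => w :: pvRebuildA (pvSkipAlnum cs) ws
      | [] => []
    else [c] :: pvRebuildA cs rw
termination_by cs _ => cs.length
decreasing_by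
  · exact Nat.lt_succ_of_le (pvSkipAlnum_length_le cs)
  · simp

def reverse_words_keep_punctuations (sentence : String) : String :=
  let cs := sentence.toList
  let reversedWords := (pvWordsA cs).reverse   -- words[::-1]
  String.mk (pvRebuildA cs reversedWords).flatten   -- ''.join(result)

-- ===== PORT B =====

-- 'not ch.isalnum()' (the separator test of B's left/right scans)
def pvNotAl (c : Char) : Bool := !(PySem.Chars.isalnum c)

theorem pvHeadDropWhileFalse {α : Type} (p : α → Bool) :
    ∀ (l : List α) (c : α) (r : List α), l.dropWhile p = c :: r → p c = false := by
  intro l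
  induction l with
  | nil => intro c r h; simp [List.dropWhile] at h
  | cons a l ih =>
    intro c r h
    by_cases ha : p a = true
    · rw [List.dropWhile_cons_of_pos ha] at h; exact ih c r h
    · rw [List.dropWhile_cons_of_neg (by simp_all)] at h
      cases h; simp_all

-- termination of B's loop: the middle substring is strictly shorter
theorem pvMidLt (s : List Char) (hr : s.dropWhile pvNotAl ≠ []) :
    ((((s.dropWhile pvNotAl).dropWhile PySem.Chars.isalnum).reverse.dropWhile
        pvNotAl).dropWhile PySem.Chars.isalnum).reverse.length < s.length := by
  obtain ⟨c, r', hcr⟩ := List.exists_cons_of_ne_nil hr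
  have hc : pvNotAl c = false := pvHeadDropWhileFalse pvNotAl s c r' hcr
  have hal : PySem.Chars.isalnum c = true := by simpa [pvNotAl] using hc
  have h1 : (s.dropWhile pvNotAl).dropWhile PySem.Chars.isalnum
      = r'.dropWhile PySem.Chars.isalnum := by
    rw [hcr, List.dropWhile_cons_of_pos hal]
  have h2 : (r'.dropWhile PySem.Chars.isalnum).length ≤ r'.length :=
    List.length_dropWhile_le _ _
  have h3 : r'.length < s.length := by
    have := List.length_dropWhile_le pvNotAl s
    rw [hcr] at this; simp at this; omega
  calc ((((s.dropWhile pvNotAl).dropWhile PySem.Chars.isalnum).reverse.dropWhile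
          pvNotAl).dropWhile PySem.Chars.isalnum).reverse.length
      ≤ (((s.dropWhile pvNotAl).dropWhile PySem.Chars.isalnum).reverse.dropWhile
          pvNotAl).length := by simp [List.length_dropWhile_le]
    _ ≤ ((s.dropWhile pvNotAl).dropWhile PySem.Chars.isalnum).length := by
          simpa using List.length_dropWhile_le pvNotAl
            ((s.dropWhile pvNotAl).dropWhile PySem.Chars.isalnum).reverse
    _ ≤ r'.length := by rw [h1]; exact h2
    _ < s.length := h3

-- the while-loop of B: accL/accR are out_left/out_right, s the current middle slice
def pvLoopB (accL accR : List (List Char)) (s : List Char) : List Char :=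
  let p := s.takeWhile pvNotAl                     -- while not s[i1].isalnum(): i1 += 1
  let r := s.dropWhile pvNotAl
  if hr : r = [] then
    accL.flatten ++ s ++ accR.reverse.flatten      -- break: no word left; final join
  else
    let w1 := r.takeWhile PySem.Chars.isalnum      -- while s[j1].isalnum(): j1 += 1
    let r1 := r.dropWhile PySem.Chars.isalnum
    let rv := r1.reverse                           -- right-to-left scans
    let t := rv.dropWhile pvNotAl                  -- while not s[k2-1].isalnum(): k2 -= 1
    if t = [] then
      accL.flatten ++ s ++ accR.reverse.flatten    -- break: single word left; final join
    else
      let q := rv.takeWhile pvNotAl                -- s[k2:]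
      let w2 := (t.takeWhile PySem.Chars.isalnum).reverse   -- s[i2:k2]
      let mid := (t.dropWhile PySem.Chars.isalnum).reverse  -- s = s[j1:i2]
      pvLoopB (accL ++ [p, w2]) (accR ++ [q.reverse, w1]) mid
termination_by s.length
decreasing_by
  exact pvMidLt s hr

def reverse_words_keep_punctuations_alt (sentence : String) : String :=
  String.mk (pvLoopB [] [] sentence.toList)

-- ===== PRECONDITION & SPEC =====
def Spec_reverse_words_keep_punctuations (sentence : String) (out : String) : Prop := out = reverse_words_keep_punctuations_alt sentence
instance (sentence : String) (out : String) : Decidable (Spec_reverse_words_keep_punctuations sentence out) := by unfold Spec_reverse_words_keep_punctuations; infer_instance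

-- ===== CLAIM (what is proved, stated in full; the proofs are below) =====
def Claim_equal_reverse_words_keep_punctuations : Prop := ∀ (sentence : String), Dom_reverse_words_keep_punctuations sentence → Spec_reverse_words_keep_punctuations sentence (reverse_words_keep_punctuations sentence)

-- ===== LEMMAS AND PROOFS =====

-- canonical tokenization used only by the proofs
inductive PvTok where
  | word : List Char → PvTok
  | sep  : Char → PvTok
deriving DecidableEq, Repr

def pvTokSpec : List Char → List Char → List PvTok
  | cur, [] => if cur = [] then [] else [PvTok.word cur]
  | cur, c :: cs =>
    if PySem.Chars.isalnum c then pvTokSpec (cur ++ [c]) cs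
    else (if cur = [] then [] else [PvTok.word cur]) ++ PvTok.sep c :: pvTokSpec [] cs

def pvWordOf : PvTok → Option (List Char)
  | PvTok.word w => some w
  | PvTok.sep _ => none

def pvEmitB : List PvTok → List (List Char) → List (List Char)
  | [], _ => []
  | PvTok.sep c :: ts, rw => [c] :: pvEmitB ts rw
  | PvTok.word _ :: ts, rw =>
    match rw with
    | w :: ws => w :: pvEmitB ts ws
    | [] => []

-- the canonical result: separators in place, word slots filled with the reversed word list
def pvN (s : List Char) : List Char :=
  (pvEmitB (pvTokSpec [] s) (((pvTokSpec [] s).filterMap pvWordOf).reverse)).flatten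

-- small unfolding equations, used to rewrite exactly one step at a time
theorem pvTokSpec_cons (cur : List Char) (c : Char) (cs : List Char) :
    pvTokSpec cur (c :: cs) = if PySem.Chars.isalnum c then pvTokSpec (cur ++ [c]) cs
      else (if cur = [] then [] else [PvTok.word cur]) ++ PvTok.sep c :: pvTokSpec [] cs := rfl

@[simp] theorem pvWordOf_word (w : List Char) : pvWordOf (PvTok.word w) = some w := rfl
@[simp] theorem pvWordOf_sep (c : Char) : pvWordOf (PvTok.sep c) = none := rfl
@[simp] theorem pvEmitB_nil (rw : List (List Char)) : pvEmitB [] rw = [] := rfl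
@[simp] theorem pvEmitB_sep (c : Char) (ts : List PvTok) (rw : List (List Char)) :
    pvEmitB (PvTok.sep c :: ts) rw = [c] :: pvEmitB ts rw := rfl
@[simp] theorem pvEmitB_word (w u : List Char) (ts : List PvTok) (ws : List (List Char)) :
    pvEmitB (PvTok.word w :: ts) (u :: ws) = u :: pvEmitB ts ws := rfl

theorem pvWordsOfSeps (p : List Char) : (p.map PvTok.sep).filterMap pvWordOf = [] := by
  induction p <;> simp_all

-- ---- A equals pvN ----

theorem pvWordsA_eq (cs : List Char) (ws : List (List Char)) (cur : List Char) :
    (if (cs.foldl pvStepA (ws, cur)).2 = [] then (cs.foldl pvStepA (ws, cur)).1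
     else (cs.foldl pvStepA (ws, cur)).1 ++ [(cs.foldl pvStepA (ws, cur)).2])
      = ws ++ (pvTokSpec cur cs).filterMap pvWordOf := by
  induction cs generalizing ws cur with
  | nil => simp [pvTokSpec]; split <;> simp
  | cons c cs ih =>
    simp only [List.foldl_cons, pvStepA, pvTokSpec]
    split
    · exact ih ws (cur ++ [c])
    · split
      · rw [ih]; simp_all
      · rw [ih]; simp_all

theorem pvTokSpec_flush (cs : List Char) (cur : List Char) (h : cur ≠ []) :
    pvTokSpec cur cs =
      PvTok.word (cur ++ cs.takeWhile PySem.Chars.isalnum) :: pvTokSpec [] (pvSkipAlnum cs) := by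
  induction cs generalizing cur with
  | nil => simp [pvTokSpec, pvSkipAlnum, h]
  | cons c cs ih =>
    simp only [pvTokSpec, pvSkipAlnum]
    by_cases hc : PySem.Chars.isalnum c = true
    · simp only [hc, if_pos, List.takeWhile_cons]
      rw [ih (cur ++ [c]) (by simp)]
      simp
    · simp [hc, h, pvTokSpec]

theorem pvRebuild_eq_emit (n : Nat) (cs : List Char) (hn : cs.length ≤ n) (rw : List (List Char)) :
    pvRebuildA cs rw = pvEmitB (pvTokSpec [] cs) rw := by
  induction n generalizing cs rw with
  | zero =>
    have : cs = [] := List.eq_nil_of_length_eq_zero (Nat.le_zero.mp hn)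
    subst this; simp [pvRebuildA, pvTokSpec]
  | succ n ih =>
    match cs with
    | [] => simp [pvRebuildA, pvTokSpec]
    | c :: cs =>
      by_cases hc : PySem.Chars.isalnum c = true
      · have hflush := pvTokSpec_flush cs [c] (by simp)
        simp only [pvTokSpec, hc, ite_true, List.nil_append] at hflush ⊢
        rw [hflush]
        match rw with
        | [] => simp [pvRebuildA, hc, pvEmitB]
        | w :: ws =>
          simp only [pvRebuildA, hc, ite_true, pvEmitB_word]
          have hlen : (pvSkipAlnum cs).length ≤ n := by
            have := pvSkipAlnum_length_le cs
            simp at hn; omega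
          rw [ih (pvSkipAlnum cs) hlen ws]
      · have h1 : pvRebuildA (c :: cs) rw = [c] :: pvRebuildA cs rw := by
          rw [pvRebuildA.eq_def]; simp [hc]
        rw [h1, ih cs (by simp at hn; omega) rw]
        simp [pvTokSpec, hc]

theorem pvA_eq_N (sentence : String) :
    reverse_words_keep_punctuations sentence = String.mk (pvN sentence.toList) := by
  simp only [reverse_words_keep_punctuations, pvWordsA, pvN]
  rw [pvWordsA_eq]
  simp only [List.nil_append]
  rw [pvRebuild_eq_emit sentence.toList.length sentence.toList le_rfl]

-- ---- structure lemmas about pvTokSpec / pvEmitB ----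

theorem pvSkipAlnum_eq (l : List Char) : pvSkipAlnum l = l.dropWhile PySem.Chars.isalnum := by
  induction l with
  | nil => simp [pvSkipAlnum]
  | cons c cs ih =>
    by_cases hc : PySem.Chars.isalnum c = true
    · simp [pvSkipAlnum, hc, ih]
    · simp [pvSkipAlnum, hc]

theorem pvSpanAll {α : Type} (p : α → Bool) (a b : List α)
    (ha : ∀ x ∈ a, p x = true) (hb : ∀ d, b.head? = some d → p d = false) :
    (a ++ b).takeWhile p = a ∧ (a ++ b).dropWhile p = b := by
  induction a with
  | nil =>
    cases b with
    | nil => simp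
    | cons d b' =>
      have := hb d rfl
      simp [List.takeWhile_cons, List.dropWhile_cons, this]
  | cons x a' ih =>
    have hx : p x = true := ha x (by simp)
    have := ih (fun y hy => ha y (by simp [hy])) 
    simp [List.takeWhile_cons, List.dropWhile_cons, hx, this]

theorem pvTokSep (p rest : List Char) (hp : ∀ c ∈ p, PySem.Chars.isalnum c = false) :
    pvTokSpec [] (p ++ rest) = p.map PvTok.sep ++ pvTokSpec [] rest := by
  induction p with
  | nil => simp
  | cons c p ih =>
    have hc : PySem.Chars.isalnum c = false := hp c (by simp)
    simp only [List.cons_append, pvTokSpec_cons, hc]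
    simp [ih (fun d hd => hp d (by simp [hd]))]

theorem pvTokWord (w rest : List Char) (hw : w ≠ [])
    (hwa : ∀ c ∈ w, PySem.Chars.isalnum c = true)
    (hr : ∀ d, rest.head? = some d → PySem.Chars.isalnum d = false) :
    pvTokSpec [] (w ++ rest) = PvTok.word w :: pvTokSpec [] rest := by
  obtain ⟨c, w', hw'⟩ := List.exists_cons_of_ne_nil hw
  subst hw'
  have hc : PySem.Chars.isalnum c = true := hwa c (by simp)
  rw [List.cons_append, pvTokSpec_cons, if_pos hc]
  simp only [List.nil_append]
  rw [pvTokSpec_flush _ [c] (by simp)]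
  have hspan := pvSpanAll PySem.Chars.isalnum w' rest (fun x hx => hwa x (by simp [hx])) hr
  rw [hspan.1, pvSkipAlnum_eq, hspan.2]
  simp

theorem pvTokSplit (a : List Char)
    (hl : ∀ d, a.getLast? = some d → PySem.Chars.isalnum d = false) (ha : a ≠ []) :
    ∀ (cur b : List Char), pvTokSpec cur (a ++ b) = pvTokSpec cur a ++ pvTokSpec [] b := by
  induction a with
  | nil => simp at ha
  | cons x a ih =>
    intro cur b
    cases a with
    | nil =>
      have hx : PySem.Chars.isalnum x = false := hl x (by simp)
      simp [pvTokSpec_cons, hx, pvTokSpec]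
    | cons y a' =>
      have hl' : ∀ d, (y :: a').getLast? = some d → PySem.Chars.isalnum d = false := by
        intro d hd; exact hl d (by simpa [List.getLast?_cons_cons] using hd)
      by_cases hx : PySem.Chars.isalnum x = true
      · have e1 : pvTokSpec cur ((x :: y :: a') ++ b) = pvTokSpec (cur ++ [x]) ((y :: a') ++ b) := by
          rw [List.cons_append, pvTokSpec_cons, if_pos hx]
        have e2 : pvTokSpec cur (x :: y :: a') = pvTokSpec (cur ++ [x]) (y :: a') := by
          rw [pvTokSpec_cons, if_pos hx]
        rw [e1, e2, ih hl' (by simp)]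
      · have hx' : PySem.Chars.isalnum x = false := by simpa using hx
        have e1 : pvTokSpec cur ((x :: y :: a') ++ b)
            = (if cur = [] then [] else [PvTok.word cur]) ++ PvTok.sep x
              :: pvTokSpec [] ((y :: a') ++ b) := by
          rw [List.cons_append, pvTokSpec_cons, hx']; simp
        have e2 : pvTokSpec cur (x :: y :: a')
            = (if cur = [] then [] else [PvTok.word cur]) ++ PvTok.sep x
              :: pvTokSpec [] (y :: a') := by
          rw [pvTokSpec_cons, hx']; simp
        rw [e1, e2, ih hl' (by simp)]
        simp

theorem pvEmitSplit : ∀ (ts1 : List PvTok) (rw1 : List (List Char)) (ts2 : List PvTok)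
    (rw2 : List (List Char)), (ts1.filterMap pvWordOf).length = rw1.length →
    pvEmitB (ts1 ++ ts2) (rw1 ++ rw2) = pvEmitB ts1 rw1 ++ pvEmitB ts2 rw2 := by
  intro ts1
  induction ts1 with
  | nil =>
    intro rw1 ts2 rw2 h
    have : rw1 = [] := List.eq_nil_of_length_eq_zero (by simpa using h.symm)
    subst this; simp
  | cons t ts ih =>
    intro rw1 ts2 rw2 h
    cases t with
    | sep c =>
      simp only [List.cons_append, pvEmitB_sep]
      rw [ih rw1 ts2 rw2 (by simpa using h)]
    | word w =>
      cases rw1 with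
      | nil => simp at h
      | cons u rw1' =>
        simp only [List.cons_append, pvEmitB_word]
        rw [ih rw1' ts2 rw2 (by simpa using h)]

theorem pvEmitSepPrefix (p : List Char) (ts : List PvTok) (rw : List (List Char)) :
    pvEmitB (p.map PvTok.sep ++ ts) rw = p.map (fun c => [c]) ++ pvEmitB ts rw := by
  induction p <;> simp_all

theorem pvEmitSep (p : List Char) :
    pvEmitB (p.map PvTok.sep) [] = p.map (fun c => [c]) := by
  induction p with
  | nil => simp
  | cons c p ih => simp [ih]

theorem pvFlattenSingle (p : List Char) : (p.map (fun c => [c])).flatten = p := by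
  induction p with
  | nil => simp
  | cons c p ih => simp [ih]

-- emitting with the UNreversed word list reconstructs the input
theorem pvEmitId : ∀ (s cur : List Char),
    (pvEmitB (pvTokSpec cur s) ((pvTokSpec cur s).filterMap pvWordOf)).flatten = cur ++ s := by
  intro s
  induction s with
  | nil =>
    intro cur
    by_cases h : cur = [] <;> simp [pvTokSpec, h]
  | cons c cs ih =>
    intro cur
    by_cases hc : PySem.Chars.isalnum c = true
    · rw [pvTokSpec_cons, if_pos hc, ih (cur ++ [c])]; simp
    · rw [pvTokSpec_cons, if_neg (by simp [hc])]
      by_cases h : cur = []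
      · simp only [h, ite_true, List.nil_append, List.filterMap_cons, pvWordOf_sep,
          pvEmitB_sep, List.flatten_cons]
        rw [ih []]
        simp
      · simp only [h, ite_false, List.cons_append, List.nil_append, List.filterMap_cons,
          List.filterMap_append, List.filterMap_nil, pvWordOf_word, pvWordOf_sep,
          pvEmitB_word, pvEmitB_sep, List.flatten_cons]
        rw [ih []]
        simp

theorem pvN_small (s : List Char)
    (h : ((pvTokSpec [] s).filterMap pvWordOf).length ≤ 1) : pvN s = s := by
  unfold pvN
  have he : ((pvTokSpec [] s).filterMap pvWordOf).reverse
      = (pvTokSpec [] s).filterMap pvWordOf := by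
    cases hw : (pvTokSpec [] s).filterMap pvWordOf with
    | nil => simp
    | cons a l =>
      cases l with
      | nil => simp
      | cons b l' => exfalso; rw [hw] at h; simp at h
  rw [he]
  simpa using pvEmitId s []

-- the outside-in decomposition of pvN
theorem pvN_decomp (p w1 mid w2 q : List Char)
    (hp : ∀ c ∈ p, PySem.Chars.isalnum c = false)
    (hq : ∀ c ∈ q, PySem.Chars.isalnum c = false)
    (hw1 : w1 ≠ []) (hw1a : ∀ c ∈ w1, PySem.Chars.isalnum c = true)
    (hw2 : w2 ≠ []) (hw2a : ∀ c ∈ w2, PySem.Chars.isalnum c = true)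
    (hmh : ∀ d, mid.head? = some d → PySem.Chars.isalnum d = false)
    (hml : ∀ d, mid.getLast? = some d → PySem.Chars.isalnum d = false)
    (hm : mid ≠ []) :
    pvN (p ++ w1 ++ mid ++ w2 ++ q) = p ++ w2 ++ pvN mid ++ w1 ++ q := by
  have hT : pvTokSpec [] (p ++ w1 ++ mid ++ w2 ++ q)
      = p.map PvTok.sep ++ PvTok.word w1 :: (pvTokSpec [] mid
        ++ PvTok.word w2 :: q.map PvTok.sep) := by
    have e1 : p ++ w1 ++ mid ++ w2 ++ q = p ++ (w1 ++ (mid ++ (w2 ++ q))) := by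
      simp [List.append_assoc]
    rw [e1, pvTokSep p _ hp]
    rw [pvTokWord w1 _ hw1 hw1a (by
      intro d hd
      obtain ⟨m, mid', hmeq⟩ := List.exists_cons_of_ne_nil hm
      rw [hmeq] at hd
      simp at hd
      subst hd
      exact hmh m (by rw [hmeq]; rfl))]
    rw [pvTokSplit mid hml hm [] (w2 ++ q)]
    rw [pvTokWord w2 q hw2 hw2a (by
      intro d hd
      cases hq' : q with
      | nil => rw [hq'] at hd; simp at hd
      | cons e q' =>
        rw [hq'] at hd; simp at hd
        subst hd
        exact hq e (by rw [hq']; simp))]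
    rw [show pvTokSpec [] q = pvTokSpec [] (q ++ []) by simp, pvTokSep q [] hq]
    simp [pvTokSpec]
  have hW : (pvTokSpec [] (p ++ w1 ++ mid ++ w2 ++ q)).filterMap pvWordOf
      = w1 :: ((pvTokSpec [] mid).filterMap pvWordOf ++ [w2]) := by
    rw [hT]
    simp [List.filterMap_append, pvWordsOfSeps]
  unfold pvN
  rw [hW, hT]
  simp only [List.reverse_cons, List.reverse_append, List.reverse_nil, List.nil_append,
    List.append_assoc, List.singleton_append]
  rw [pvEmitSepPrefix]
  simp only [List.cons_append]
  rw [pvEmitB_word]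
  rw [pvEmitSplit (pvTokSpec [] mid) (((pvTokSpec [] mid).filterMap pvWordOf).reverse)
    (PvTok.word w2 :: q.map PvTok.sep) [w1] (by simp)]
  rw [pvEmitB_word, pvEmitSep]
  simp [pvFlattenSingle, List.append_assoc]

-- facts about takeWhile members
theorem pvMemTakeWhile {α : Type} (p : α → Bool) (l : List α) :
    ∀ x ∈ l.takeWhile p, p x = true := by
  induction l with
  | nil => simp
  | cons a l ih =>
    by_cases ha : p a = true
    · simp only [List.takeWhile_cons, ha, ite_true, List.mem_cons]
      rintro x (rfl | hx)
      · exact ha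
      · exact ih x hx
    · simp [List.takeWhile_cons, ha]

-- the loop invariant of B
theorem pvLoopInv : ∀ (n : Nat) (s : List Char), s.length ≤ n → ∀ (accL accR : List (List Char)),
    pvLoopB accL accR s = accL.flatten ++ pvN s ++ accR.reverse.flatten := by
  intro n
  induction n with
  | zero =>
    intro s hs accL accR
    have hnil : s = [] := List.eq_nil_of_length_eq_zero (Nat.le_zero.mp hs)
    subst hnil
    rw [pvLoopB]
    have : pvN [] = [] := pvN_small [] (by simp [pvTokSpec])
    simp [this]
  | succ n ih =>
    intro s hs accL accR
    rw [pvLoopB]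
    by_cases hr : s.dropWhile pvNotAl = []
    · -- no word: s is all separators, pvN s = s
      simp only [hr, dite_true]
      have hall : ∀ c ∈ s, PySem.Chars.isalnum c = false := by
        intro c hc
        have := (List.dropWhile_eq_nil_iff).mp hr c hc
        simpa [pvNotAl] using this
      have hNs : pvN s = s := by
        apply pvN_small
        rw [show s = s ++ [] by simp, pvTokSep s [] hall]
        simp [pvWordsOfSeps, pvTokSpec]
      rw [hNs]
    · simp only [hr, dite_false]
      set r := s.dropWhile pvNotAl with hrdef
      obtain ⟨c, r', hcr⟩ := List.exists_cons_of_ne_nil hr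
      have hc : PySem.Chars.isalnum c = true := by
        have := pvHeadDropWhileFalse pvNotAl s c r' hcr
        simpa [pvNotAl] using this
      have hsplit : s = s.takeWhile pvNotAl ++ r := (List.takeWhile_append_dropWhile).symm
      have hp : ∀ x ∈ s.takeWhile pvNotAl, PySem.Chars.isalnum x = false := by
        intro x hx
        have := pvMemTakeWhile pvNotAl s x hx
        simpa [pvNotAl] using this
      have hw1a : ∀ x ∈ r.takeWhile PySem.Chars.isalnum, PySem.Chars.isalnum x = true :=
        pvMemTakeWhile _ r
      have hw1ne : r.takeWhile PySem.Chars.isalnum ≠ [] := by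
        rw [hcr, List.takeWhile_cons_of_pos hc]; simp
      have hrsplit : r = r.takeWhile PySem.Chars.isalnum ++ r.dropWhile PySem.Chars.isalnum :=
        (List.takeWhile_append_dropWhile).symm
      set r1 := r.dropWhile PySem.Chars.isalnum with hr1def
      have hr1h : ∀ d, r1.head? = some d → PySem.Chars.isalnum d = false := by
        intro d hd
        cases h1 : r1 with
        | nil => rw [h1] at hd; simp at hd
        | cons e r2 =>
          rw [h1] at hd; simp at hd
          exact hd ▸ pvHeadDropWhileFalse _ r e r2 h1
      by_cases ht : r1.reverse.dropWhile pvNotAl = []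
      · -- single word: r1 is all separators
        simp only [ht, ite_true]
        have hr1all : ∀ x ∈ r1, PySem.Chars.isalnum x = false := by
          intro x hx
          have hx' : x ∈ r1.reverse := by simpa using hx
          have := (List.dropWhile_eq_nil_iff).mp ht x hx'
          simpa [pvNotAl] using this
        have hNs : pvN s = s := by
          apply pvN_small
          conv_lhs => rw [hsplit, hrsplit]
          rw [pvTokSep _ _ hp]
          rw [pvTokWord _ _ hw1ne hw1a hr1h]
          rw [show pvTokSpec [] r1 = pvTokSpec [] (r1 ++ []) by simp, pvTokSep r1 [] hr1all]
          simp [pvWordsOfSeps, pvTokSpec]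
        rw [hNs]
      · simp only [ht, ite_false]
        set rv := r1.reverse with hrvdef
        set t := rv.dropWhile pvNotAl with htdef
        obtain ⟨e, t', het⟩ := List.exists_cons_of_ne_nil ht
        have he : PySem.Chars.isalnum e = true := by
          have := pvHeadDropWhileFalse pvNotAl rv e t' het
          simpa [pvNotAl] using this
        set w2 := (t.takeWhile PySem.Chars.isalnum).reverse with hw2def
        set mid := (t.dropWhile PySem.Chars.isalnum).reverse with hmiddef
        set qr := (rv.takeWhile pvNotAl).reverse with hqrdef
        have hr1eq : r1 = mid ++ w2 ++ qr := by
          have h1 : rv = rv.takeWhile pvNotAl ++ t := by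
            rw [htdef]; exact (List.takeWhile_append_dropWhile).symm
          have h2 : t = t.takeWhile PySem.Chars.isalnum ++ t.dropWhile PySem.Chars.isalnum :=
            (List.takeWhile_append_dropWhile).symm
          have h3 : r1 = rv.reverse := by rw [hrvdef]; simp
          rw [h3]
          conv_lhs => rw [h1]
          rw [List.reverse_append]
          rw [show t.reverse = (List.dropWhile PySem.Chars.isalnum t).reverse
              ++ (List.takeWhile PySem.Chars.isalnum t).reverse by
            conv_lhs => rw [h2]
            rw [List.reverse_append]]
        have hw2ne : w2 ≠ [] := by
          rw [hw2def, het, List.takeWhile_cons_of_pos he]; simp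
        have hw2a : ∀ x ∈ w2, PySem.Chars.isalnum x = true := by
          intro x hx
          exact pvMemTakeWhile _ t x (by
            have : x ∈ (t.takeWhile PySem.Chars.isalnum).reverse := by rw [← hw2def]; exact hx
            simpa using this)
        have hqa : ∀ x ∈ qr, PySem.Chars.isalnum x = false := by
          intro x hx
          have hx' : x ∈ rv.takeWhile pvNotAl := by
            have : x ∈ (rv.takeWhile pvNotAl).reverse := by rw [← hqrdef]; exact hx
            simpa using this
          have := pvMemTakeWhile pvNotAl rv x hx'
          simpa [pvNotAl] using this
        have hmne : mid ≠ [] := by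
          intro h0
          obtain ⟨u, w2', hw2eq⟩ := List.exists_cons_of_ne_nil hw2ne
          have hu : r1.head? = some u := by rw [hr1eq, h0, hw2eq]; simp
          have h1 := hr1h u hu
          have h2 : PySem.Chars.isalnum u = true := hw2a u (by rw [hw2eq]; simp)
          simp [h2] at h1
        have hmh : ∀ d, mid.head? = some d → PySem.Chars.isalnum d = false := by
          intro d hd
          apply hr1h
          rw [hr1eq]
          obtain ⟨m, mid', hmeq⟩ := List.exists_cons_of_ne_nil hmne
          rw [hmeq] at hd ⊢
          simp at hd
          simp [hd]
        have hml : ∀ d, mid.getLast? = some d → PySem.Chars.isalnum d = false := by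
          intro d hd
          rw [hmiddef, List.getLast?_reverse] at hd
          cases h1 : t.dropWhile PySem.Chars.isalnum with
          | nil => rw [h1] at hd; simp at hd
          | cons u t2 =>
            rw [h1] at hd; simp at hd
            exact hd ▸ pvHeadDropWhileFalse _ t u t2 h1
        have hseq : s = s.takeWhile pvNotAl ++ r.takeWhile PySem.Chars.isalnum
            ++ mid ++ w2 ++ qr := by
          conv_lhs => rw [hsplit, hrsplit, hr1eq]
          simp [List.append_assoc]
        have hmidlen : mid.length ≤ n := by
          have := pvMidLt s hr
          rw [← hrdef, ← hr1def, ← hrvdef, ← htdef, ← hmiddef] at this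
          omega
        rw [ih mid hmidlen]
        have hNs : pvN s = s.takeWhile pvNotAl ++ w2 ++ pvN mid
            ++ r.takeWhile PySem.Chars.isalnum ++ qr := by
          conv_lhs => rw [hseq]
          exact pvN_decomp _ _ _ _ _ hp hqa hw1ne hw1a hw2ne hw2a hmh hml hmne
        rw [hNs]
        simp [List.append_assoc]

-- ===== VERDICT (by name: the statement is the Claim_ definition above) =====
theorem reverse_words_keep_punctuations_spec : Claim_equal_reverse_words_keep_punctuations := by
  intro sentence _
  unfold Spec_reverse_words_keep_punctuations
  rw [pvA_eq_N]
  unfold reverse_words_keep_punctuations_alt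
  rw [pvLoopInv sentence.toList.length sentence.toList le_rfl]
  simp
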